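-- pv_equiv track=rewrite | github.com/mathiasooi/AoC | 2018/5.py | solve
-- ===== SOURCE A (Python) =====
-- def willReact(a, b):
--     return abs(ord(a) - ord(b)) == 32
--
-- def solve(x):
--     l = []
--     for i in x:
--         if l and willReact(l[-1], i):
--             l.pop()
--         else:
--             l.append(i)
--     return l
-- ===== SOURCE B (Python) =====
-- def willReact(a, b):
--     return abs(ord(a) - ord(b)) == 32
--
-- def solve(x):
--     units = list(x)
--     while True:
--         for i in range(len(units) - 1):
--             if willReact(units[i], units[i + 1]):
--                 del units[i:i + 2]
--                 break
--         else:
--             return units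
-- ===== Notes on version B (the rewrite author's own statement) =====
-- stated objective: alternative
-- what changed: Replaced the one-pass stack (push, pop on reaction) by a fixpoint loop that repeatedly scans for the leftmost reacting adjacent pair and deletes it until none remains; equality rests on a proved confluence-style lemma that removing the leftmost pair preserves the stack result.
import Mathlib
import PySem

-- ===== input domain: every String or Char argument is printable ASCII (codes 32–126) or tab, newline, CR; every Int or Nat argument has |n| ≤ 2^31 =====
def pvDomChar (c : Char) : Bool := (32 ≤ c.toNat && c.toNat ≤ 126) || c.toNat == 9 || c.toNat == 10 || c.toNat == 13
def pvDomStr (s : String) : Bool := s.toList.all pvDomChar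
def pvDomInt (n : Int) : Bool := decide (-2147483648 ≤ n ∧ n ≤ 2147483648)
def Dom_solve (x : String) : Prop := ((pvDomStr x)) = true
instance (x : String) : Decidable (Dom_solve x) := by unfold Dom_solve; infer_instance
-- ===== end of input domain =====

-- B replaces A's single-pass stack by repeated removal of the leftmost reacting
-- adjacent pair until a fixpoint; same return value, no speed claim (B is slower).

-- ===== PORT A =====
-- willReact(a, b): abs(ord(a) - ord(b)) == 32   (shared helper of A and B)
def pvReact (a b : Char) : Bool :=
  ((a.toNat : Int) - (b.toNat : Int)).natAbs == 32

-- literal port of A's loop body: `if l and willReact(l[-1], i): l.pop() else: l.append(i)`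
def pvAStep (l : List Char) (c : Char) : List Char :=
  if !l.isEmpty && pvReact (l.getLast?.getD ' ') c then l.dropLast else l ++ [c]

def solve (x : String) : List String :=
  (x.toList.foldl pvAStep []).map (fun c => String.ofList [c])

-- ===== PORT B =====
-- the inner for-loop of B: find the leftmost adjacent reacting pair, if any,
-- and return the list with that pair deleted
def pvFindRemove : List Char → Option (List Char)
  | a :: b :: t => if pvReact a b then some t else (pvFindRemove (b :: t)).map (a :: ·)
  | _ => none

theorem pvFindRemove_length : ∀ (l l' : List Char), pvFindRemove l = some l' → l'.length + 2 = l.length := by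
  intro l
  induction l with
  | nil => intro l' h; simp [pvFindRemove] at h
  | cons a t ih =>
    intro l' h
    cases t with
    | nil => simp [pvFindRemove] at h
    | cons b q =>
      simp only [pvFindRemove] at h
      split at h
      · cases h; simp
      · rcases Option.map_eq_some_iff.mp h with ⟨m, hm, rfl⟩
        have := ih m hm
        simp at this ⊢; omega

-- B's outer while-loop: repeat until no pair reacts
def pvReduce (l : List Char) : List Char :=
  match h : pvFindRemove l with
  | some l' => pvReduce l'
  | none => l
termination_by l.length
decreasing_by
  have := pvFindRemove_length l l' h
  omega

def solve_alt (x : String) : List String :=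
  (pvReduce x.toList).map (fun c => String.ofList [c])

-- ===== PRECONDITION & SPEC =====
def Spec_solve (x : String) (out : List String) : Prop := out = solve_alt x
instance (x : String) (out : List String) : Decidable (Spec_solve x out) := by unfold Spec_solve; infer_instance

-- ===== CLAIM (what is proved, stated in full; the proofs are below) =====
def Claim_equal_solve : Prop := ∀ (x : String), Dom_solve x → Spec_solve x (solve x)

-- ===== LEMMAS AND PROOFS =====

-- clean cons-stack step (head = top of stack); used only in the proofs
def pvStep (S : List Char) (c : Char) : List Char :=
  match S with
  | [] => [c]
  | h :: t => if pvReact h c then t else c :: h :: t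

-- A's literal step, acting on the reversed stack, is pvStep
theorem pvA_bridge : ∀ (xs S : List Char),
    List.foldl pvAStep S.reverse xs = (List.foldl pvStep S xs).reverse := by
  intro xs
  induction xs with
  | nil => intro S; rfl
  | cons c rest ih =>
    intro S
    cases S with
    | nil =>
      simp only [List.foldl, pvAStep, pvStep, List.reverse_nil, List.isEmpty_nil]
      simpa using ih [c]
    | cons h t =>
      have ha : pvAStep ((h :: t).reverse) c
          = if pvReact h c then t.reverse else (c :: h :: t).reverse := by
        simp [pvAStep, List.reverse_cons]
      simp only [List.foldl, ha]
      by_cases hr : pvReact h c = true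
      · simp only [hr, if_pos]
        simpa [pvStep, hr] using ih t
      · simp only [hr, Bool.false_eq_true, if_neg, not_false_iff]
        simpa [pvStep, hr] using ih (c :: h :: t)

-- along an irreducible block the stack only grows
theorem pvRun_irr_cons : ∀ (p : List Char) (a : Char) (T : List Char),
    pvFindRemove (a :: p) = none →
    List.foldl pvStep (a :: T) p = p.reverse ++ a :: T := by
  intro p
  induction p with
  | nil => intro a T _; rfl
  | cons b q ih =>
    intro a T h
    simp only [pvFindRemove] at h
    by_cases hr : pvReact a b = true
    · simp [hr] at h
    · simp only [Bool.not_eq_true] at hr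
      simp only [hr, if_neg, Bool.false_eq_true, not_false_iff, Option.map_eq_none_iff] at h
      simp only [List.foldl, pvStep, hr, Bool.false_eq_true, if_neg, not_false_iff]
      rw [ih b (a :: T) h]
      simp

theorem pvRun_irr : ∀ (p : List Char), pvFindRemove p = none →
    List.foldl pvStep [] p = p.reverse := by
  intro p h
  cases p with
  | nil => rfl
  | cons a q =>
    simp only [List.foldl, pvStep]
    simpa using pvRun_irr_cons q a [] h

-- a prefix of an irreducible list is irreducible
theorem pvFR_prefix (u : List Char) : ∀ (v : List Char),
    pvFindRemove (u ++ v) = none → pvFindRemove u = none := by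
  induction u with
  | nil => intro v _; rfl
  | cons x u2 ih =>
    intro v h
    cases u2 with
    | nil => rfl
    | cons y u3 =>
      simp only [List.cons_append, pvFindRemove] at h ⊢
      by_cases hr : pvReact x y = true
      · simp [hr] at h
      · simp only [Bool.not_eq_true] at hr
        simp only [hr, Bool.false_eq_true, if_neg, not_false_iff, Option.map_eq_none_iff] at h ⊢
        exact ih v h

-- decomposition at the leftmost removal site
theorem pvFR_some : ∀ (l l' : List Char), pvFindRemove l = some l' →
    ∃ p a b r, l = p ++ a :: b :: r ∧ l' = p ++ r ∧ pvReact a b = true ∧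
      pvFindRemove (p ++ [a]) = none := by
  intro l
  induction l with
  | nil => intro l' h; simp [pvFindRemove] at h
  | cons a t ih =>
    intro l' h
    cases t with
    | nil => simp [pvFindRemove] at h
    | cons b q =>
      simp only [pvFindRemove] at h
      by_cases hr : pvReact a b = true
      · refine ⟨[], a, b, q, by simp, ?_, hr, by rfl⟩
        simp [hr] at h; simp [h]
      · simp only [Bool.not_eq_true] at hr
        simp only [hr, Bool.false_eq_true, if_neg, not_false_iff] at h
        rcases Option.map_eq_some_iff.mp h with ⟨m, hm, rfl⟩
        rcases ih m hm with ⟨p', x, y, r, h1, h2, h3, h4⟩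
        refine ⟨a :: p', x, y, r, by simp [h1], by simp [h2], h3, ?_⟩
        cases p' with
        | nil =>
          simp only [List.nil_append] at h1
          cases h1
          simp [pvFindRemove, hr]
        | cons c p'' =>
          simp only [List.cons_append] at h1
          cases h1
          simp only [List.cons_append, pvFindRemove, hr, Bool.false_eq_true, if_neg,
            not_false_iff]
          simpa using h4
 
-- removing the leftmost reacting pair does not change the stack result
theorem pvCancel : ∀ (p : List Char) (a b : Char) (r : List Char),
    pvFindRemove (p ++ [a]) = none → pvReact a b = true →
    List.foldl pvStep [] (p ++ a :: b :: r) = List.foldl pvStep [] (p ++ r) := by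
  intro p a b r hp hab
  cases p with
  | nil => simp [List.foldl, pvStep, hab]
  | cons c q =>
    have hcq : pvFindRemove (c :: q) = none := pvFR_prefix (c :: q) [a] hp
    have hkey : pvFindRemove (c :: (q ++ [a])) = none := by simpa using hp
    simp only [List.cons_append, List.foldl]
    have hstep : pvStep [] c = [c] := rfl
    rw [hstep]
    have e1 : q ++ a :: b :: r = (q ++ [a]) ++ b :: r := by simp
    rw [e1, List.foldl_append, pvRun_irr_cons (q ++ [a]) c [] hkey]
    have e2 : (q ++ [a]).reverse ++ [c] = a :: (q.reverse ++ [c]) := by simp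
    rw [e2]
    simp only [List.foldl, pvStep, hab, if_pos]
    rw [List.foldl_append, pvRun_irr_cons q c [] hcq]

theorem pvMain : ∀ (n : ℕ) (l : List Char), l.length ≤ n →
    List.foldl pvStep [] l = (pvReduce l).reverse := by
  intro n
  induction n with
  | zero =>
    intro l hl
    have : l = [] := by cases l <;> simp_all
    subst this
    rw [pvReduce]
    rfl
  | succ n ih =>
    intro l hl
    rw [pvReduce]
    split
    · next l' h =>
      rcases pvFR_some l l' h with ⟨p, a, b, r, h1, h2, h3, h4⟩
      have hlen := pvFindRemove_length l l' h
      rw [h1, pvCancel p a b r h4 h3, ← h2]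
      exact ih l' (by omega)
    · next h => exact pvRun_irr l h

-- ===== VERDICT (by name: the statement is the Claim_ definition above) =====
theorem solve_spec : Claim_equal_solve := by
  intro x _
  unfold Spec_solve solve solve_alt
  have h0 : (([] : List Char)) = ([] : List Char).reverse := rfl
  rw [h0, pvA_bridge x.toList [], pvMain x.toList.length x.toList le_rfl]
  simp
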